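-- pv_equiv track=rewrite | github.com/ronliang6/cadex-interview | q5.py | get_string_letter_statistics
-- ===== SOURCE A (Python) =====
-- def get_string_letter_statistics(s: str):
--     """
--     Return various statistics about letters in string s.
--
--     Question 5.1, 5.2, 5.3, 5.4
--     Only considers letters in the English alphabet.
--     :param s: a string.
--     :return: various statistics about letters in string s
--     """
--     ALPHABET_LENGTH = 26
--     # array tracks letter counts, 0 to 25 for a to z, 26 to 51 for A to Z
--     letter_count_arr = [0 for _ in range(ALPHABET_LENGTH * 2)]
--
--     # count the letters
--     for c in s:
--         ascii_value = ord(c)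
--         if ord("A") <= ascii_value <= ord("Z") or ord("a") <= ascii_value <= ord("z"):
--             if ascii_value > ord("Z"):
--                 # assigns the array positions 0 to 25 inclusive to letters a to z
--                 letter_count_arr[ascii_value - ord("a")] += 1
--             else:
--                 # assigns the array positions 26 to 51 inclusive to letters A to Z
--                 letter_count_arr[ascii_value - ord("A") + ALPHABET_LENGTH] += 1
--
--     case_insensitive_letter_count_arr = [lower + upper for lower, upper in
--                                          zip(letter_count_arr[0:ALPHABET_LENGTH], letter_count_arr[ALPHABET_LENGTH:])]
--
--     # Question 5.1
--     # Thought not explicitly stated, sample input 1 suggests that this should be case insensitive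
--     # Your question also suggests that there must be at least one letter in the sentence. This will work either way.
--     unique_letter_count = sum([1 if count else 0 for count in case_insensitive_letter_count_arr])
--
--     # Question 5.2
--     VOWELS = ['a', 'e', 'i', 'o', 'u']
--     vowel_count = 0
--     for c in VOWELS:
--         vowel_count += case_insensitive_letter_count_arr[ord(c) - ord("a")]
--
--     # Question 5.3
--     uppercase_count = sum(letter_count_arr[26:])
--
--     # Question 5.4
--     most_common_letter_count = max(case_insensitive_letter_count_arr)
--
--     return unique_letter_count, vowel_count, uppercase_count, most_common_letter_count
-- ===== SOURCE B (Python) =====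
-- def get_string_letter_statistics(s: str):
--     """Same statistics computed letter-major: lowercase the string once, then
--     for each of the 26 letters scan it for that letter's count (26 staged
--     passes), instead of A's single char-major pass over a 52-slot array."""
--     lo = s.lower()
--     alphabet = "abcdefghijklmnopqrstuvwxyz"
--     counts = [sum(1 for c in lo if c == letter) for letter in alphabet]
--     unique_letter_count = len([n for n in counts if n])
--     vowel_count = sum(counts[ord(v) - ord("a")] for v in "aeiou")
--     uppercase_count = sum(1 for c in s if "A" <= c <= "Z")
--     most_common_letter_count = max(counts)
--     return unique_letter_count, vowel_count, uppercase_count, most_common_letter_count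
-- ===== Notes on version B (the rewrite author's own statement) =====
-- stated objective: alternative
-- what changed: Replaced A's char-major single pass over a 52-slot ord-indexed array plus zip-merge of its halves by a letter-major computation: lowercase the string once, then for each of the 26 alphabet letters scan it to get that letter's count; the four statistics are read off this 26-entry list (filter length, vowel lookups, a direct uppercase scan, max).
import Mathlib
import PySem

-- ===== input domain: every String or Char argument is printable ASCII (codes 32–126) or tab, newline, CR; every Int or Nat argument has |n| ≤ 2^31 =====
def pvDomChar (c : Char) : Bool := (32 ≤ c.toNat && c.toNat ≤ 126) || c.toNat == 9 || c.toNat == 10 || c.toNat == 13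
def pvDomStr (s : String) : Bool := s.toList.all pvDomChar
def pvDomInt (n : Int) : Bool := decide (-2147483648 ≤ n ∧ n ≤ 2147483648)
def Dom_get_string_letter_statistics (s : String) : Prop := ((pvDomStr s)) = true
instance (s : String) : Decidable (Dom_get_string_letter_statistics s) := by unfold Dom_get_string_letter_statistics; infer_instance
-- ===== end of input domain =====

-- B computes the statistics letter-major: lowercase the string once, then scan it once per
-- alphabet letter, instead of A's char-major pass over a 52-slot array (objective: alternative).

-- ===== PORT A =====
-- A-side helper: the body of A's counting loop ("for c in s: ..."); indices are provably
-- in range 0..51, so Python's "letter_count_arr[i] += 1" is List.set / List.getD (exact here).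
def pvStepA (arr : List Int) (c : Char) : List Int :=
  let ascii := c.toNat
  if (65 ≤ ascii ∧ ascii ≤ 90) ∨ (97 ≤ ascii ∧ ascii ≤ 122) then
    if ascii > 90 then
      arr.set (ascii - 97) (arr.getD (ascii - 97) 0 + 1)
    else
      arr.set (ascii - 65 + 26) (arr.getD (ascii - 65 + 26) 0 + 1)
  else arr

def get_string_letter_statistics (s : String) : Int × Int × Int × Int :=
  -- letter_count_arr = [0 for _ in range(ALPHABET_LENGTH * 2)]
  let arr0 : List Int := (List.range 52).map (fun _ => (0:Int))
  let arr := s.toList.foldl pvStepA arr0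
  -- zip(letter_count_arr[0:26], letter_count_arr[26:]) — in-range slices, exact as take/drop
  let ci := ((arr.take 26).zip (arr.drop 26)).map (fun p => p.1 + p.2)
  let unique := (ci.map (fun count => if count ≠ 0 then (1 : Int) else 0)).sum
  let vowel := (['a', 'e', 'i', 'o', 'u'] : List Char).foldl
    (fun acc c => acc + ci.getD (c.toNat - 97) 0) 0   -- index ord(c)-ord('a') is in range
  let upper := (arr.drop 26).sum
  -- max(case_insensitive_letter_count_arr): ci always has 26 entries, so [] is unreachable
  let most := match ci with | [] => 0 | x :: t => t.foldl max x
  (unique, vowel, upper, most)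

-- ===== PORT B =====
def get_string_letter_statistics_alt (s : String) : Int × Int × Int × Int :=
  let lo := PySem.Str.lower s
  let alphabet := "abcdefghijklmnopqrstuvwxyz"
  -- counts = [sum(1 for c in lo if c == letter) for letter in alphabet]
  let counts := alphabet.toList.map (fun letter =>
    lo.toList.foldl (fun acc c => if c == letter then acc + 1 else acc) (0:Int))
  -- len([n for n in counts if n])
  let unique : Int := ((counts.filter (fun n => n != 0)).length : Int)
  -- sum(counts[ord(v) - ord("a")] for v in "aeiou")
  let vowel := ("aeiou".toList.map (fun v => counts.getD (v.toNat - 97) 0)).sum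
  -- sum(1 for c in s if "A" <= c <= "Z")
  let upper := s.toList.foldl (fun acc c => if 'A' ≤ c ∧ c ≤ 'Z' then acc + 1 else acc) (0:Int)
  -- max(counts): counts always has 26 entries, so [] is unreachable
  let most := match counts with | [] => 0 | x :: t => t.foldl max x
  (unique, vowel, upper, most)

-- ===== PRECONDITION & SPEC =====
def Spec_get_string_letter_statistics (s : String) (out : Int × Int × Int × Int) : Prop := out = get_string_letter_statistics_alt s
instance (s : String) (out : Int × Int × Int × Int) : Decidable (Spec_get_string_letter_statistics s out) := by unfold Spec_get_string_letter_statistics; infer_instance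

-- ===== CLAIM (what is proved, stated in full; the proofs are below) =====
def Claim_equal_get_string_letter_statistics : Prop := ∀ (s : String), Dom_get_string_letter_statistics s → Spec_get_string_letter_statistics s (get_string_letter_statistics s)

-- ===== LEMMAS AND PROOFS =====

theorem pv_char_eq_iff_toNat {c d : Char} : c = d ↔ c.toNat = d.toNat := by
  constructor
  · intro h; rw [h]
  · intro h
    have h2 := congrArg Char.ofNat h
    rwa [Char.ofNat_toNat, Char.ofNat_toNat] at h2

theorem pv_char_le_iff {c d : Char} : c ≤ d ↔ c.toNat ≤ d.toNat := by
  rw [Char.le_def, UInt32.le_iff_toNat_le]; rfl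

theorem pv_ofNat_toNat {n : Nat} (h : n < 55296) : (Char.ofNat n).toNat = n := by
  have hv : n.isValidChar := Or.inl h
  simp [Char.toNat_ofNat, hv]

def pvCharOf (i : Nat) : Char := if i < 26 then Char.ofNat (97 + i) else Char.ofNat (i + 39)

theorem pvCharOf_toNat (i : Nat) (h : i < 52) :
    (pvCharOf i).toNat = if i < 26 then 97 + i else i + 39 := by
  unfold pvCharOf; split <;> rw [pv_ofNat_toNat (by omega)]

theorem pv_lowerChar_toNat {c : Char} (h1 : 65 ≤ c.toNat) (h2 : c.toNat ≤ 90) :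
    (PySem.Chars.lowerChar c).toNat = c.toNat + 32 := by
  have hu : PySem.Chars.isupper c = true := by
    simp only [PySem.Chars.isupper, Bool.and_eq_true, decide_eq_true_eq]
    constructor <;> rw [pv_char_le_iff]
    · show 65 ≤ c.toNat; omega
    · show c.toNat ≤ 90; omega
  simp only [PySem.Chars.lowerChar, hu, if_true]
  rw [pv_ofNat_toNat (by omega)]

theorem pv_lowerChar_of_not_upper {c : Char} (h : ¬ (65 ≤ c.toNat ∧ c.toNat ≤ 90)) :
    PySem.Chars.lowerChar c = c := by
  have hu : PySem.Chars.isupper c = false := by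
    simp only [PySem.Chars.isupper, Bool.and_eq_false_iff, decide_eq_false_iff_not]
    rw [pv_char_le_iff, pv_char_le_iff]
    show ¬ 65 ≤ c.toNat ∨ ¬ c.toNat ≤ 90
    omega
  simp [PySem.Chars.lowerChar, hu]

theorem pv_upper_iff {c : Char} : ('A' ≤ c ∧ c ≤ 'Z') ↔ (65 ≤ c.toNat ∧ c.toNat ≤ 90) := by
  have hA : ('A' : Char).toNat = 65 := rfl
  have hZ : ('Z' : Char).toNat = 90 := rfl
  rw [pv_char_le_iff, pv_char_le_iff, hA, hZ]

-- A's counting loop: after the fold, slot i holds the number of occurrences of pvCharOf i.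
theorem pvAfold_update (p : List Char) (arr : List Int) (h : arr.length = 52) (c : Char)
    (j : Nat) (hj : j < 52)
    (hstep : pvStepA arr c = arr.set j (arr.getD j 0 + 1))
    (hchar : ∀ i, i < 52 → (pvCharOf i = c ↔ i = j))
    (ih : ∀ arr : List Int, arr.length = 52 →
      (List.foldl pvStepA arr p).length = 52 ∧
      ∀ i, i < 52 → (List.foldl pvStepA arr p).getD i 0
        = arr.getD i 0 + (p.count (pvCharOf i) : Int)) :
    (List.foldl pvStepA arr (c :: p)).length = 52 ∧
    ∀ i, i < 52 → (List.foldl pvStepA arr (c :: p)).getD i 0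
      = arr.getD i 0 + ((c :: p).count (pvCharOf i) : Int) := by
  rw [List.foldl_cons, hstep]
  obtain ⟨ihl, ihg⟩ := ih (arr.set j (arr.getD j 0 + 1)) (by simp [h])
  refine ⟨ihl, fun i hi => ?_⟩
  rw [ihg i hi]
  have hset : (arr.set j (arr.getD j 0 + 1)).getD i 0
      = if j = i then arr.getD j 0 + 1 else arr.getD i 0 := by
    rw [List.getD, List.getElem?_set, h]
    split
    · next hji => subst hji; simp [List.getD]
    · rfl
  rw [hset, List.count_cons]
  by_cases hji : j = i
  · have : (c == pvCharOf i) = true := by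
      simp only [beq_iff_eq]
      exact (((hchar i hi).mpr hji.symm)).symm
    rw [this]
    subst hji
    simp
    omega
  · have : (c == pvCharOf i) = false := by
      simp only [beq_eq_false_iff_ne, Ne]
      intro hc
      exact hji (((hchar i hi).mp hc.symm)).symm
    rw [this]
    simp [hji]

theorem pvAfold (p : List Char) : ∀ (arr : List Int), arr.length = 52 →
    (List.foldl pvStepA arr p).length = 52 ∧
    ∀ i, i < 52 → (List.foldl pvStepA arr p).getD i 0
      = arr.getD i 0 + (p.count (pvCharOf i) : Int) := by
  induction p with
  | nil => intro arr h; simp [h]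
  | cons c p ih =>
    intro arr h
    by_cases hL : (65 ≤ c.toNat ∧ c.toNat ≤ 90) ∨ (97 ≤ c.toNat ∧ c.toNat ≤ 122)
    · by_cases hgt : c.toNat > 90
      · refine pvAfold_update p arr h c (c.toNat - 97) (by omega) ?_ ?_ ih
        · unfold pvStepA; simp only [if_pos hL, if_pos hgt]
        · intro i hi
          constructor
          · intro hc
            have := congrArg Char.toNat hc
            rw [pvCharOf_toNat i hi] at this
            split at this <;> omega
          · intro hij
            rw [pv_char_eq_iff_toNat, pvCharOf_toNat i hi]
            split <;> omega
      · refine pvAfold_update p arr h c (c.toNat - 65 + 26) (by omega) ?_ ?_ ih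
        · unfold pvStepA; simp only [if_pos hL, if_neg hgt]
        · intro i hi
          constructor
          · intro hc
            have := congrArg Char.toNat hc
            rw [pvCharOf_toNat i hi] at this
            split at this <;> omega
          · intro hij
            rw [pv_char_eq_iff_toNat, pvCharOf_toNat i hi]
            split <;> omega
    · have hstep : pvStepA arr c = arr := by
        unfold pvStepA; simp only [if_neg hL]
      rw [List.foldl_cons, hstep]
      obtain ⟨ihl, ihg⟩ := ih arr h
      refine ⟨ihl, fun i hi => ?_⟩
      rw [ihg i hi, List.count_cons]
      have : (c == pvCharOf i) = false := by
        simp only [beq_eq_false_iff_ne, Ne]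
        intro hc
        have := congrArg Char.toNat hc
        rw [pvCharOf_toNat i hi] at this
        split at this <;> omega
      rw [this]
      simp

theorem pvArr (p : List Char) :
    List.foldl pvStepA ((List.range 52).map (fun _ => (0:Int))) p
      = (List.range 52).map (fun i => (p.count (pvCharOf i) : Int)) := by
  obtain ⟨hl, hg⟩ := pvAfold p ((List.range 52).map fun _ => (0:Int)) (by simp)
  apply List.ext_getElem
  · rw [hl, List.length_map, List.length_range]
  · intro i h1 h2
    have hi : i < 52 := by simpa using h2
    have e1 := hg i hi
    rw [List.getD_eq_getElem _ _ (by rw [hl]; exact hi),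
        List.getD_eq_getElem _ _ (by simpa using hi)] at e1
    rw [e1]
    simp only [List.getElem_map, List.getElem_range, zero_add]

-- B's per-letter scan of the lowercased string sees l's and L's occurrences together.
theorem pv_count_lower (l : Char) (h1 : 97 ≤ l.toNat) (h2 : l.toNat ≤ 122) (p : List Char) :
    (p.map PySem.Chars.lowerChar).count l = p.count l + p.count (Char.ofNat (l.toNat - 32)) := by
  have hC : (Char.ofNat (l.toNat - 32)).toNat = l.toNat - 32 := pv_ofNat_toNat (by omega)
  induction p with
  | nil => simp
  | cons x p ih =>
    rw [List.map_cons, List.count_cons, List.count_cons, List.count_cons, ih]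
    by_cases hU : 65 ≤ x.toNat ∧ x.toNat ≤ 90
    · have hlow := pv_lowerChar_toNat hU.1 hU.2
      have e1 : (x == l) = false := by
        simp only [beq_eq_false_iff_ne, Ne, pv_char_eq_iff_toNat]; omega
      rw [e1]
      by_cases hm : x.toNat + 32 = l.toNat
      · have e2 : (PySem.Chars.lowerChar x == l) = true := by
          simp only [beq_iff_eq, pv_char_eq_iff_toNat, hlow]; omega
        have e3 : (x == Char.ofNat (l.toNat - 32)) = true := by
          simp only [beq_iff_eq, pv_char_eq_iff_toNat, hC]; omega
        rw [e2, e3]; simp; omega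
      · have e2 : (PySem.Chars.lowerChar x == l) = false := by
          simp only [beq_eq_false_iff_ne, Ne, pv_char_eq_iff_toNat, hlow]; omega
        have e3 : (x == Char.ofNat (l.toNat - 32)) = false := by
          simp only [beq_eq_false_iff_ne, Ne, pv_char_eq_iff_toNat, hC]; omega
        rw [e2, e3]; simp
    · rw [pv_lowerChar_of_not_upper hU]
      have e3 : (x == Char.ofNat (l.toNat - 32)) = false := by
        simp only [beq_eq_false_iff_ne, Ne, pv_char_eq_iff_toNat, hC]; omega
      rw [e3]
      simp
      omega

theorem pv_ind_sum (k : Nat) (hk : k < 26) :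
    ((List.range 26).map (fun i => if i = k then (1:Int) else 0)).sum = 1 := by
  have he : (fun i => if i = k then (1:Int) else 0)
      = fun i => if (fun i => i == k) i = true then (1:Int) else 0 := by
    funext i; by_cases h : i = k <;> simp [h]
  rw [he, PySem.List.sum_map_ite_one_zero]
  have : List.countP (fun i => i == k) (List.range 26) = List.count k (List.range 26) := rfl
  rw [this, List.count_range, if_pos hk]
  rfl

theorem pvUpperSum (p : List Char) :
    ((List.range 26).map (fun i => (p.count (pvCharOf (26 + i)) : Int))).sum
      = (p.countP (fun c => decide ('A' ≤ c ∧ c ≤ 'Z')) : Int) := by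
  induction p with
  | nil => simp
  | cons c p ih =>
    have hstep : ((List.range 26).map (fun i => (List.count (pvCharOf (26 + i)) (c :: p) : Int)))
        = (List.range 26).map (fun i => (List.count (pvCharOf (26 + i)) p : Int)
            + (if c = pvCharOf (26 + i) then (1:Int) else 0)) := by
      apply List.map_congr_left
      intro i _
      rw [List.count_cons]
      by_cases h : c = pvCharOf (26 + i)
      · rw [if_pos h, if_pos (beq_iff_eq.mpr h)]; push_cast; ring
      · rw [if_neg h, if_neg (by simpa using h)]; push_cast; ring
    rw [hstep, PySem.List.sum_map_add_int, ih, List.countP_cons]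
    by_cases hc : 'A' ≤ c ∧ c ≤ 'Z'
    · obtain ⟨h1, h2⟩ := pv_upper_iff.mp hc
      have hind : ((List.range 26).map (fun i => if c = pvCharOf (26 + i) then (1:Int) else 0))
          = (List.range 26).map (fun i => if i = c.toNat - 65 then (1:Int) else 0) := by
        apply List.map_congr_left
        intro i hi
        rw [List.mem_range] at hi
        have ht : (pvCharOf (26 + i)).toNat = 65 + i := by
          rw [pvCharOf_toNat (26 + i) (by omega)]
          rw [if_neg (by omega)]
          omega
        by_cases h : i = c.toNat - 65
        · rw [if_pos h, if_pos (by rw [pv_char_eq_iff_toNat, ht]; omega)]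
        · rw [if_neg h, if_neg (by rw [pv_char_eq_iff_toNat, ht]; omega)]
      rw [hind, pv_ind_sum _ (by omega)]
      rw [if_pos (by simpa using hc)]
      push_cast; ring
    · have hind : ((List.range 26).map (fun i => if c = pvCharOf (26 + i) then (1:Int) else 0))
          = (List.range 26).map (fun _ => (0:Int)) := by
        apply List.map_congr_left
        intro i hi
        rw [List.mem_range] at hi
        have ht : (pvCharOf (26 + i)).toNat = 65 + i := by
          rw [pvCharOf_toNat (26 + i) (by omega)]
          rw [if_neg (by omega)]
          omega
        have hnc : ¬ (65 ≤ c.toNat ∧ c.toNat ≤ 90) := fun h => hc (pv_upper_iff.mpr h)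
        rw [if_neg (by rw [pv_char_eq_iff_toNat, ht]; omega)]
      rw [hind]
      rw [if_neg (by simpa using hc)]
      simp

theorem pv_main (s : String) : get_string_letter_statistics s = get_string_letter_statistics_alt s := by
  simp only [get_string_letter_statistics, get_string_letter_statistics_alt]
  rw [pvArr s.toList]
  -- A's case-insensitive zip-merge, split into the two halves
  have hsplit : (List.range 52).map (fun i => (List.count (pvCharOf i) s.toList : Int))
      = (List.range 26).map (fun i => (List.count (pvCharOf i) s.toList : Int))
        ++ (List.range 26).map (fun i => (List.count (pvCharOf (26+i)) s.toList : Int)) := by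
    rw [show (52:Nat) = 26 + 26 from rfl, List.range_add, List.map_append, List.map_map]
    rfl
  rw [hsplit]
  rw [List.take_left' (by simp), List.drop_left' (by simp), List.zip_map']
  -- both sides produce the SAME 26-entry list of case-insensitive counts:
  have hci : ((List.range 26).map
        (fun i => ((List.count (pvCharOf i) s.toList : Int), (List.count (pvCharOf (26+i)) s.toList : Int)))).map
          (fun q : Int × Int => q.1 + q.2)
      = (List.range 26).map (fun i => ((s.toList.map PySem.Chars.lowerChar).count (pvCharOf i) : Int)) := by
    rw [List.map_map]
    apply List.map_congr_left
    intro i hi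
    rw [List.mem_range] at hi
    have hb : (pvCharOf i).toNat = 97 + i := by
      rw [pvCharOf_toNat i (by omega), if_pos hi]
    have hcnt := pv_count_lower (pvCharOf i) (by omega) (by omega) s.toList
    have hup : Char.ofNat ((pvCharOf i).toNat - 32) = pvCharOf (26+i) := by
      rw [pv_char_eq_iff_toNat, pv_ofNat_toNat (by omega),
          pvCharOf_toNat (26+i) (by omega), if_neg (by omega)]
      omega
    rw [hup] at hcnt
    simp only [Function.comp_apply]
    push_cast [hcnt]
    ring
  have hB : ("abcdefghijklmnopqrstuvwxyz".toList).map (fun letter =>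
        ((PySem.Str.lower s).toList).foldl (fun acc c => if c == letter then acc + 1 else acc) (0:Int))
      = (List.range 26).map (fun i => ((s.toList.map PySem.Chars.lowerChar).count (pvCharOf i) : Int)) := by
    have halpha : ("abcdefghijklmnopqrstuvwxyz".toList) = (List.range 26).map pvCharOf := by decide
    rw [halpha, List.map_map]
    apply List.map_congr_left
    intro i _
    simp only [Function.comp_apply]
    rw [PySem.List.foldl_beq_add_one, PySem.Str.toList_lower]
    simp [PySem.Chars.lower]
  rw [hci, hB]
  simp only [Prod.mk.injEq]
  refine ⟨?_, ?_, ?_, trivial⟩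
  · -- unique: A's 0/1-sum over the counts list = B's length of its non-zero filter
    have hu1 : (fun (n : Int) => if n ≠ 0 then (1:Int) else 0)
        = fun n => if (fun (n : Int) => n != 0) n = true then (1:Int) else 0 := by
      funext n; by_cases h : n = 0 <;> simp [h]
    rw [hu1, PySem.List.sum_map_ite_one_zero, List.countP_eq_length_filter]
  · -- vowels: both read the same 5 slots of the same list
    simp only [List.foldl_cons, List.foldl_nil]
    have hstr : ("aeiou".toList) = ['a', 'e', 'i', 'o', 'u'] := rfl
    rw [hstr]
    simp only [List.map_cons, List.map_nil, List.sum_cons, List.sum_nil]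
    ring
  · -- uppercase: A's sum of the upper half = B's direct scan (both = countP uppercase)
    rw [pvUpperSum, PySem.List.foldl_ite_add_one (fun c => 'A' ≤ c ∧ c ≤ 'Z')]
    ring

-- ===== VERDICT (by name: the statement is the Claim_ definition above) =====
theorem get_string_letter_statistics_spec : Claim_equal_get_string_letter_statistics := by
  intro s _
  unfold Spec_get_string_letter_statistics
  exact pv_main s
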